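-- pv_equiv track=rewrite | github.com/zou-mono/oneTools | frmLandUseTypeConvert.py | generate_config_rel
-- ===== SOURCE A (Python) =====
-- def generate_config_rel(DLBM_INDEX, MC_index, DLMC_index, all_data):
--     header = all_data[0]
--     rel_tables = []  # 存储所有的规则关系字典
--     MC_tables = {} # 存放名称和DLBM的一对多关系表
--
--     rel = []
--     bheader = True
--     last_key = ""
--     irow = 0
--     ifirst = False
--     for row_value in all_data:
--         if bheader:
--             irow += 1
--             bheader = False
--             continue
--
--         if row_value[MC_index] != "" and not ifirst:
--             last_key = row_value[MC_index]
--             ifirst = True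
--
--         if row_value[MC_index] != "":
--             if row_value[MC_index] == last_key:
--                 rel.append({
--                     'DLBM': row_value[DLBM_INDEX],
--                     'DLMC': row_value[DLMC_index]
--                 })
--                 # key = row_value[MC_index]
--             else:
--                 MC_tables[last_key] = rel
--                 last_key = row_value[MC_index]
--                 rel = [{
--                     'DLBM': row_value[DLBM_INDEX],
--                     'DLMC': row_value[DLMC_index]
--                 }]
--         else:
--             # rel.append(row_value[DLBM_INDEX])
--             rel.append({
--                 'DLBM': row_value[DLBM_INDEX],
--                 'DLMC': row_value[DLMC_index]
--             })
--
--         if irow == len(all_data) - 1: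
--             MC_tables[last_key] = rel
--
--         irow += 1
--
--     for icol in range(DLBM_INDEX + 1, len(header)):
--         bheader = True
--         rel = {}
--
--         for row_value in all_data:
--             if bheader:
--                 bheader = False
--                 continue
--             rel[row_value[DLBM_INDEX]] = row_value[icol]
--
--         rel_tables.append(rel)
--
--     return rel_tables, MC_tables
-- ===== SOURCE B (Python) =====
-- def generate_config_rel(DLBM_INDEX, MC_index, DLMC_index, all_data):
--     header = all_data[0]
--     rows = all_data[1:]
--
--     # pass 1: forward-fill a group key per row (carry the last non-empty MC cell)
--     keys = []
--     cur = ""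
--     for row in rows:
--         if row[MC_index] != "":
--             cur = row[MC_index]
--         keys.append(cur)
--     # rows before the first named key belong to that first key
--     first = next((k for k in keys if k != ""), "")
--     keys = [first if k == "" else k for k in keys]
--
--     # pass 2: group consecutive runs of equal keys
--     MC_tables = {}
--     group = []
--     prev = None
--     for key, row in zip(keys, rows):
--         if prev is not None and key != prev:
--             MC_tables[prev] = group
--             group = []
--         group.append({'DLBM': row[DLBM_INDEX], 'DLMC': row[DLMC_index]})
--         prev = key
--     if prev is not None:
--         MC_tables[prev] = group
--
--     # rel_tables: one pass over the rows, one dict per extra column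
--     cols = list(range(DLBM_INDEX + 1, len(header)))
--     rel_tables = [{} for _ in cols]
--     for row in rows:
--         rel_tables = [{**d, row[DLBM_INDEX]: row[icol]} for d, icol in zip(rel_tables, cols)]
--     return rel_tables, MC_tables
-- ===== Notes on version B (the rewrite author's own statement) =====
-- stated objective: alternative
-- what changed: MC_tables is built in two shaped passes (forward-fill a group key per data row, fix the leading empty run to the first named key, then flush consecutive runs of equal keys) instead of A's single carry-state pass with bheader/ifirst/irow flags, and rel_tables is built in one pass over the rows updating one dict per extra column instead of A's column-major nested loops over all_data.
import Mathlib
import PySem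

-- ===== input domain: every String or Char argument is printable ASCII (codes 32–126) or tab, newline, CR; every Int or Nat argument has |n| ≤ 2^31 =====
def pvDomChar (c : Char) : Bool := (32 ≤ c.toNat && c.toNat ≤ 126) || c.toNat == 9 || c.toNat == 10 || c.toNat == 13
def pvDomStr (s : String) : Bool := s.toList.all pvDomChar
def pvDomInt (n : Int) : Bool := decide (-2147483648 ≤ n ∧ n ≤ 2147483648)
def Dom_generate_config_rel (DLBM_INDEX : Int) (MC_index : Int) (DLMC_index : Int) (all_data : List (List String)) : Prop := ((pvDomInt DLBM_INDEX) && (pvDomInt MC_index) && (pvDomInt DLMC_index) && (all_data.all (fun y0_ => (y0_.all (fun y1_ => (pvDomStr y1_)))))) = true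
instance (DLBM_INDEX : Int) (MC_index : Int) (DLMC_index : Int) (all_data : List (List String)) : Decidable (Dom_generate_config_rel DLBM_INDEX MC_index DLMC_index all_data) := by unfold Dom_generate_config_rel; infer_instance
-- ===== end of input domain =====

-- B builds MC_tables in two shaped passes (forward-fill a group key, then group consecutive
-- runs) and rel_tables in ONE pass over the rows updating a dict per column, instead of A's
-- single carry-state pass and column-major nested loops; objective: alternative decomposition.


-- ===== PORT A =====
-- state of A's first loop: (bheader, last_key, irow, ifirst, rel, MC_tables)
def pvAState : Type := Bool × String × Int × Bool × List (List (String × String)) × PySem.Dict String (List (List (String × String)))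

-- one iteration of A's first loop body (n = len(all_data), used by the `irow == len(all_data)-1` test)
def pvAStep (MC_index DLBM_INDEX DLMC_index : Int) (n : Int) (st : pvAState) (row_value : List String) : pvAState :=
  let (bheader, last_key, irow, ifirst, rel, MC) := st
  if bheader then (false, last_key, irow + 1, ifirst, rel, MC)
  else
    let v := PySem.List.pyGetD row_value MC_index ""
    let last_key := if v ≠ "" ∧ ifirst = false then v else last_key
    let ifirst := if v ≠ "" ∧ ifirst = false then true else ifirst
    let d : List (String × String) :=
      [("DLBM", PySem.List.pyGetD row_value DLBM_INDEX ""), ("DLMC", PySem.List.pyGetD row_value DLMC_index "")]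
    let (last_key, rel, MC) :=
      if v ≠ "" then
        if v = last_key then (last_key, rel ++ [d], MC)
        else (v, [d], MC.insert last_key rel)
      else (last_key, rel ++ [d], MC)
    let MC := if irow = n - 1 then MC.insert last_key rel else MC
    (false, last_key, irow + 1, ifirst, rel, MC)

def generate_config_rel (DLBM_INDEX : Int) (MC_index : Int) (DLMC_index : Int) (all_data : List (List String)) : (List (List (String × String))) × (List (String × List (List (String × String)))) :=
  let header := PySem.List.pyGetD all_data 0 []
  let s := all_data.foldl (pvAStep MC_index DLBM_INDEX DLMC_index (all_data.length : Int))
    (true, "", 0, false, [], PySem.Dict.empty)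
  let MC_tables := s.2.2.2.2.2
  let rel_tables := (PySem.List.pyRange (DLBM_INDEX + 1) (header.length : Int) 1).foldl
    (fun rel_tables icol =>
      let r := all_data.foldl
        (fun (st : Bool × PySem.Dict String String) row_value =>
          if st.1 then (false, st.2)
          else (false, st.2.insert (PySem.List.pyGetD row_value DLBM_INDEX "") (PySem.List.pyGetD row_value icol "")))
        (true, PySem.Dict.empty)
      rel_tables ++ [r.2.items])
    []
  (rel_tables, MC_tables.items)

-- ===== PORT B =====
def generate_config_rel_alt (DLBM_INDEX : Int) (MC_index : Int) (DLMC_index : Int) (all_data : List (List String)) : (List (List (String × String))) × (List (String × List (List (String × String)))) :=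
  let header := PySem.List.pyGetD all_data 0 []
  let rows := PySem.List.slice all_data (some 1) none
  -- pass 1: forward-fill a group key per row
  let keys := (rows.foldl (fun (st : List String × String) row =>
      let v := PySem.List.pyGetD row MC_index ""
      let cur := if v ≠ "" then v else st.2
      (st.1 ++ [cur], cur)) ([], "")).1
  -- rows before the first named key belong to that first key
  let first := ((keys.find? (fun k => k != "")).getD "")
  let keys := keys.map (fun k => if k = "" then first else k)
  -- pass 2: group consecutive runs of equal keys
  let s := (keys.zip rows).foldl
    (fun (st : PySem.Dict String (List (List (String × String))) × List (List (String × String)) × Option String) kr =>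
      let (MC, group, prev) := st
      let (MC, group) := match prev with
        | some p => if kr.1 ≠ p then (MC.insert p group, ([] : List (List (String × String)))) else (MC, group)
        | none => (MC, group)
      (MC, group ++ [[("DLBM", PySem.List.pyGetD kr.2 DLBM_INDEX ""), ("DLMC", PySem.List.pyGetD kr.2 DLMC_index "")]], some kr.1))
    (PySem.Dict.empty, [], none)
  let MC_tables := match s.2.2 with
    | some p => s.1.insert p s.2.1
    | none => s.1
  -- rel_tables: one pass over the rows, one dict per extra column
  let cols := PySem.List.pyRange (DLBM_INDEX + 1) (header.length : Int) 1
  let tabs := rows.foldl (fun ds row =>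
      (ds.zip cols).map (fun dc => dc.1.insert (PySem.List.pyGetD row DLBM_INDEX "") (PySem.List.pyGetD row dc.2 "")))
    (cols.map (fun _ => (PySem.Dict.empty : PySem.Dict String String)))
  (tabs.map (fun d => d.items), MC_tables.items)

-- ===== PRECONDITION & SPEC =====
-- Pre_ excludes exactly the inputs where the Python A raises: empty all_data (IndexError on
-- all_data[0]) and out-of-range row indexing at MC_index / DLBM_INDEX / DLMC_index / any icol.
def Pre_generate_config_rel (DLBM_INDEX : Int) (MC_index : Int) (DLMC_index : Int) (all_data : List (List String)) : Prop :=
  all_data ≠ [] ∧ ∀ r ∈ all_data.tail,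
    PySem.Raise.InRange r.length MC_index ∧ PySem.Raise.InRange r.length DLBM_INDEX ∧
    PySem.Raise.InRange r.length DLMC_index ∧
    ∀ c ∈ PySem.List.pyRange (DLBM_INDEX + 1) (((all_data.headD []).length : Int)) 1,
      PySem.Raise.InRange r.length c
instance (DLBM_INDEX : Int) (MC_index : Int) (DLMC_index : Int) (all_data : List (List String)) : Decidable (Pre_generate_config_rel DLBM_INDEX MC_index DLMC_index all_data) := by unfold Pre_generate_config_rel; infer_instance

def pvWitness_generate_config_rel : Int × Int × Int × List (List String) :=
  (0, 1, 2, [["h1", "h2", "h3"], ["011", "paddy", "paddy field"], ["012", "", "dry land"]])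

def Spec_generate_config_rel (DLBM_INDEX : Int) (MC_index : Int) (DLMC_index : Int) (all_data : List (List String)) (out : (List (List (String × String))) × (List (String × List (List (String × String))))) : Prop := out = generate_config_rel_alt DLBM_INDEX MC_index DLMC_index all_data
instance (DLBM_INDEX : Int) (MC_index : Int) (DLMC_index : Int) (all_data : List (List String)) (out : (List (List (String × String))) × (List (String × List (List (String × String))))) : Decidable (Spec_generate_config_rel DLBM_INDEX MC_index DLMC_index all_data out) := by unfold Spec_generate_config_rel; infer_instance

-- ===== CLAIM (what is proved, stated in full; the proofs are below) =====
def Claim_equal_generate_config_rel : Prop := ∀ (DLBM_INDEX : Int) (MC_index : Int) (DLMC_index : Int) (all_data : List (List String)), Dom_generate_config_rel DLBM_INDEX MC_index DLMC_index all_data → Pre_generate_config_rel DLBM_INDEX MC_index DLMC_index all_data → Spec_generate_config_rel DLBM_INDEX MC_index DLMC_index all_data (generate_config_rel DLBM_INDEX MC_index DLMC_index all_data)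

-- ===== LEMMAS AND PROOFS =====

-- proof-side views of the two loops
def pvMkd (d l : Int) (r : List String) : List (String × String) :=
  [("DLBM", PySem.List.pyGetD r d ""), ("DLMC", PySem.List.pyGetD r l "")]

def pvFillFrom (m : Int) (c : String) : List (List String) → List String
  | [] => []
  | r :: rs =>
    let k := if PySem.List.pyGetD r m "" ≠ "" then PySem.List.pyGetD r m "" else c
    k :: pvFillFrom m k rs

def pvFNamed (m : Int) : List (List String) → String
  | [] => ""
  | r :: rs => if PySem.List.pyGetD r m "" ≠ "" then PySem.List.pyGetD r m "" else pvFNamed m rs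

def pvProcA (m d l : Int) (lk : String) (ifirst : Bool) (rel : List (List (String × String)))
    (MC : PySem.Dict String (List (List (String × String)))) :
    List (List String) → PySem.Dict String (List (List (String × String)))
  | [] => MC
  | r :: rs =>
    let v := PySem.List.pyGetD r m ""
    let lk1 := if v ≠ "" ∧ ifirst = false then v else lk
    let if1 := if v ≠ "" ∧ ifirst = false then true else ifirst
    let dd := pvMkd d l r
    let t :=
      if v ≠ "" then (if v = lk1 then (lk1, rel ++ [dd], MC) else (v, [dd], MC.insert lk1 rel))
      else (lk1, rel ++ [dd], MC)
    let MC3 := if rs = [] then t.2.2.insert t.1 t.2.1 else t.2.2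
    pvProcA m d l t.1 if1 t.2.1 MC3 rs

def pvProcB (d l : Int) (prev : Option String) (group : List (List (String × String)))
    (MC : PySem.Dict String (List (List (String × String)))) :
    List (String × List String) → PySem.Dict String (List (List (String × String)))
  | [] => match prev with | some p => MC.insert p group | none => MC
  | (k, r) :: ps =>
    let t := match prev with
      | some p => if k ≠ p then (MC.insert p group, ([] : List (List (String × String)))) else (MC, group)
      | none => (MC, group)
    pvProcB d l (some k) (t.2 ++ [pvMkd d l r]) t.1 ps

-- A's first loop, after the header step, is pvProcA
theorem pvFoldA_eq (m d l n : Int) : ∀ (rows : List (List String)) (lk : String) (irow : Int)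
    (ifirst : Bool) (rel : List (List (String × String)))
    (MC : PySem.Dict String (List (List (String × String)))),
    irow = n - rows.length →
    (rows.foldl (pvAStep m d l n) (false, lk, irow, ifirst, rel, MC)).2.2.2.2.2
      = pvProcA m d l lk ifirst rel MC rows := by
  intro rows
  induction rows with
  | nil => intro lk irow ifirst rel MC h; simp [pvProcA]
  | cons r rs ih =>
    intro lk irow ifirst rel MC h
    have hnext : irow + 1 = n - rs.length := by simp at h; omega
    have hcond : (irow = n - 1) = (rs = []) := by
      apply propext; constructor
      · intro h1
        have : (rs.length : Int) = 0 := by simp at h; omega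
        exact List.length_eq_zero_iff.mp (by exact_mod_cast this)
      · intro h1; subst h1; simp at h; omega
    simp only [List.foldl_cons, pvAStep, pvProcA, hcond, Bool.false_eq_true, if_false, pvMkd]
    split_ifs <;> exact ih _ _ _ _ _ hnext

-- B's grouping loop (with the post-loop flush) is pvProcB
theorem pvFoldB_eq (dlbm dlmc : Int) : ∀ (ps : List (String × List String))
    (MC : PySem.Dict String (List (List (String × String))))
    (group : List (List (String × String))) (prev : Option String),
    (let s := ps.foldl
      (fun (st : PySem.Dict String (List (List (String × String))) × List (List (String × String)) × Option String) kr =>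
        let (MC, group, prev) := st
        let (MC, group) := match prev with
          | some p => if kr.1 ≠ p then (MC.insert p group, ([] : List (List (String × String)))) else (MC, group)
          | none => (MC, group)
        (MC, group ++ [[("DLBM", PySem.List.pyGetD kr.2 dlbm ""), ("DLMC", PySem.List.pyGetD kr.2 dlmc "")]], some kr.1))
      (MC, group, prev)
     match s.2.2 with
     | some p => s.1.insert p s.2.1
     | none => s.1) = pvProcB dlbm dlmc prev group MC ps := by
  intro ps
  induction ps with
  | nil => intro MC group prev; cases prev <;> simp [pvProcB]
  | cons kr ps ih =>
    intro MC group prev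
    obtain ⟨k, r⟩ := kr
    cases prev <;> exact ih _ _ _

-- pass 1 of B: the fold computes pvFillFrom
theorem pvFill_fold (m : Int) : ∀ (rows : List (List String)) (acc : List String) (c : String),
    (rows.foldl (fun (st : List String × String) row =>
      let v := PySem.List.pyGetD row m ""
      let cur := if v ≠ "" then v else st.2
      (st.1 ++ [cur], cur)) (acc, c)).1 = acc ++ pvFillFrom m c rows := by
  intro rows
  induction rows with
  | nil => intro acc c; simp [pvFillFrom]
  | cons r rs ih =>
    intro acc c
    simp only [List.foldl_cons, pvFillFrom]
    rw [ih]
    simp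

-- the first non-empty filled key is the first non-empty MC cell
theorem pvFind_fill (m : Int) : ∀ (rows : List (List String)),
    ((pvFillFrom m "" rows).find? (fun k => k != "")).getD "" = pvFNamed m rows := by
  intro rows
  induction rows with
  | nil => simp [pvFillFrom, pvFNamed]
  | cons r rs ih =>
    by_cases hv : PySem.List.pyGetD r m "" = "" <;>
      simp [pvFillFrom, pvFNamed, hv, ih]

-- a fill started from a non-empty key contains no empty key
theorem pvMapFix_of_ne (m : Int) (f : String) : ∀ (rows : List (List String)) (c : String), c ≠ "" →
    (pvFillFrom m c rows).map (fun k => if k = "" then f else k) = pvFillFrom m c rows := by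
  intro rows
  induction rows with
  | nil => intro c hc; simp [pvFillFrom]
  | cons r rs ih =>
    intro c hc
    by_cases hv : PySem.List.pyGetD r m "" = ""
    · simp only [pvFillFrom]
      simp [hv, hc, ih _ hc]
    · simp only [pvFillFrom]
      simp [hv, ih _ hv]

-- fixing the leading empty run turns fill-from-"" into fill-from-first-named
theorem pvMapFix (m : Int) : ∀ (rows : List (List String)),
    (pvFillFrom m "" rows).map (fun k => if k = "" then pvFNamed m rows else k)
      = pvFillFrom m (pvFNamed m rows) rows := by
  intro rows
  induction rows with
  | nil => simp [pvFillFrom]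
  | cons r rs ih =>
    by_cases hv : PySem.List.pyGetD r m "" = ""
    · simp [pvFillFrom, pvFNamed, hv, ih]
    · simp [pvFillFrom, pvFNamed, hv, pvMapFix_of_ne m _ rs _ hv]

-- one-step reductions of pvProcA / pvProcB / pvFillFrom / pvFNamed under the relevant case hypotheses
theorem pvA_empty (m d l : Int) (lk : String) (ifb : Bool) (rel MC) (r : List String) (rs)
    (hv : PySem.List.pyGetD r m "" = "") :
    pvProcA m d l lk ifb rel MC (r :: rs)
      = pvProcA m d l lk ifb (rel ++ [pvMkd d l r])
          (if rs = [] then MC.insert lk (rel ++ [pvMkd d l r]) else MC) rs := by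
  simp [pvProcA, hv]

theorem pvA_same (m d l : Int) (lk : String) (rel MC) (r : List String) (rs)
    (hv : PySem.List.pyGetD r m "" ≠ "") (hlk : PySem.List.pyGetD r m "" = lk) :
    pvProcA m d l lk true rel MC (r :: rs)
      = pvProcA m d l lk true (rel ++ [pvMkd d l r])
          (if rs = [] then MC.insert lk (rel ++ [pvMkd d l r]) else MC) rs := by
  simp [pvProcA, hv, hlk]

theorem pvA_new (m d l : Int) (lk : String) (rel MC) (r : List String) (rs)
    (hv : PySem.List.pyGetD r m "" ≠ "") (hlk : PySem.List.pyGetD r m "" ≠ lk) :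
    pvProcA m d l lk true rel MC (r :: rs)
      = pvProcA m d l (PySem.List.pyGetD r m "") true [pvMkd d l r]
          (if rs = [] then (MC.insert lk rel).insert (PySem.List.pyGetD r m "") [pvMkd d l r]
           else MC.insert lk rel) rs := by
  simp [pvProcA, hv, hlk]

theorem pvA_first (m d l : Int) (lk : String) (rel MC) (r : List String) (rs)
    (hv : PySem.List.pyGetD r m "" ≠ "") :
    pvProcA m d l lk false rel MC (r :: rs)
      = pvProcA m d l (PySem.List.pyGetD r m "") true (rel ++ [pvMkd d l r])
          (if rs = [] then MC.insert (PySem.List.pyGetD r m "") (rel ++ [pvMkd d l r]) else MC) rs := by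
  simp [pvProcA, hv]

theorem pvB_same (d l : Int) (k : String) (rel MC) (r : List String) (ps) :
    pvProcB d l (some k) rel MC ((k, r) :: ps)
      = pvProcB d l (some k) (rel ++ [pvMkd d l r]) MC ps := by
  simp [pvProcB]

theorem pvB_new (d l : Int) (p k : String) (rel MC) (r : List String) (ps) (hk : k ≠ p) :
    pvProcB d l (some p) rel MC ((k, r) :: ps)
      = pvProcB d l (some k) [pvMkd d l r] (MC.insert p rel) ps := by
  simp [pvProcB, hk]

theorem pvFill_empty (m : Int) (c : String) (r : List String) (rs)
    (hv : PySem.List.pyGetD r m "" = "") :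
    pvFillFrom m c (r :: rs) = c :: pvFillFrom m c rs := by
  simp [pvFillFrom, hv]

theorem pvFill_named (m : Int) (c : String) (r : List String) (rs)
    (hv : PySem.List.pyGetD r m "" ≠ "") :
    pvFillFrom m c (r :: rs) = PySem.List.pyGetD r m "" :: pvFillFrom m (PySem.List.pyGetD r m "") rs := by
  simp [pvFillFrom, hv]

theorem pvFN_empty (m : Int) (r : List String) (rs) (hv : PySem.List.pyGetD r m "" = "") :
    pvFNamed m (r :: rs) = pvFNamed m rs := by
  simp [pvFNamed, hv]

theorem pvFN_named (m : Int) (r : List String) (rs) (hv : PySem.List.pyGetD r m "" ≠ "") :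
    pvFNamed m (r :: rs) = PySem.List.pyGetD r m "" := by
  simp [pvFNamed, hv]

-- main correspondence, phase 2 (a named key has been seen: ifirst = true, last_key = lk)
theorem pvL2 (m d l : Int) : ∀ (rows : List (List String)) (lk : String)
    (rel : List (List (String × String))) (MC : PySem.Dict String (List (List (String × String)))),
    rows ≠ [] →
    pvProcA m d l lk true rel MC rows
      = pvProcB d l (some lk) rel MC ((pvFillFrom m lk rows).zip rows) := by
  intro rows
  induction rows with
  | nil => intro lk rel MC h; exact absurd rfl h
  | cons r rs ih =>
    intro lk rel MC _
    by_cases hv : PySem.List.pyGetD r m "" = ""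
    · rw [pvFill_empty m lk r rs hv, List.zip_cons_cons, pvB_same, pvA_empty m d l lk true rel MC r rs hv]
      cases rs with
      | nil => simp [pvProcA, pvProcB, pvFillFrom, pvMkd]
      | cons r' rs' => rw [if_neg (List.cons_ne_nil _ _)]; rw [ih _ _ _ (by simp)]
    · by_cases hlk : PySem.List.pyGetD r m "" = lk
      · rw [pvFill_named m lk r rs hv, List.zip_cons_cons, hlk, pvB_same,
          pvA_same m d l lk rel MC r rs hv hlk]
        cases rs with
        | nil => simp [pvProcA, pvProcB, pvFillFrom, pvMkd]
        | cons r' rs' => rw [if_neg (List.cons_ne_nil _ _)]; rw [ih _ _ _ (by simp)]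
      · rw [pvFill_named m lk r rs hv, List.zip_cons_cons, pvB_new d l lk _ rel MC r _ hlk,
          pvA_new m d l lk rel MC r rs hv hlk]
        cases rs with
        | nil => simp [pvProcA, pvProcB, pvFillFrom, pvMkd]
        | cons r' rs' => rw [if_neg (List.cons_ne_nil _ _)]; rw [ih _ _ _ (by simp)]

-- main correspondence, phase 1 (no named key seen yet: ifirst = false, last_key = "")
theorem pvL1 (m d l : Int) : ∀ (rs : List (List String)) (r : List String)
    (rel : List (List (String × String))) (MC : PySem.Dict String (List (List (String × String)))),
    pvProcA m d l "" false rel MC (r :: rs)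
      = pvProcB d l (some (pvFNamed m (r :: rs))) rel MC
          ((pvFillFrom m (pvFNamed m (r :: rs)) (r :: rs)).zip (r :: rs)) := by
  intro rs
  induction rs with
  | nil =>
    intro r rel MC
    by_cases hv : PySem.List.pyGetD r m "" = ""
    · rw [pvFN_empty m r [] hv, pvA_empty m d l "" false rel MC r [] hv]
      simp [pvProcA, pvProcB, pvFillFrom, pvFNamed, pvMkd, hv]
    · rw [pvFN_named m r [] hv, pvA_first m d l "" rel MC r [] hv]
      simp [pvProcA, pvProcB, pvFillFrom, pvMkd, hv]
  | cons r' rs' ih =>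
    intro r rel MC
    by_cases hv : PySem.List.pyGetD r m "" = ""
    · rw [pvFN_empty m r _ hv, pvFill_empty m _ r _ hv, List.zip_cons_cons,
        pvB_same, pvA_empty m d l "" false rel MC r _ hv]
      rw [if_neg (List.cons_ne_nil _ _)]
      exact ih r' _ _
    · rw [pvFN_named m r _ hv, pvFill_named m _ r _ hv, List.zip_cons_cons,
        pvB_same, pvA_first m d l "" rel MC r _ hv]
      rw [if_neg (List.cons_ne_nil _ _)]
      exact pvL2 m d l (r' :: rs') _ _ _ (by simp)

-- starting pass 2 with prev = None is the same as prev = (first key) on a non-empty list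
theorem pvProcB_none (d l : Int) (k : String) (r : List String) (ps : List (String × List String))
    (MC : PySem.Dict String (List (List (String × String)))) :
    pvProcB d l none [] MC ((k, r) :: ps) = pvProcB d l (some k) [] MC ((k, r) :: ps) := by
  simp [pvProcB]

-- A's inner rel_tables loop after the header row
theorem pvSkip_fold (d c : Int) : ∀ (rows : List (List String)) (dct : PySem.Dict String String),
    (rows.foldl (fun (st : Bool × PySem.Dict String String) row_value =>
        if st.1 then (false, st.2)
        else (false, st.2.insert (PySem.List.pyGetD row_value d "") (PySem.List.pyGetD row_value c "")))
      (false, dct))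
    = (false, rows.foldl (fun dct row_value =>
        dct.insert (PySem.List.pyGetD row_value d "") (PySem.List.pyGetD row_value c "")) dct) := by
  intro rows
  induction rows with
  | nil => intro dct; rfl
  | cons r rs ih => intro dct; simp only [List.foldl_cons]; rw [← ih]; rfl

-- B's one-pass rel_tables loop is the per-column fold (column-major ↔ row-major swap)
theorem pvZip_fold (d : Int) (cols : List Int) : ∀ (rows : List (List String)) (f : Int → PySem.Dict String String),
    rows.foldl (fun ds row =>
        (ds.zip cols).map (fun dc => dc.1.insert (PySem.List.pyGetD row d "") (PySem.List.pyGetD row dc.2 "")))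
      (cols.map f)
    = cols.map (fun c => rows.foldl (fun dct row =>
        dct.insert (PySem.List.pyGetD row d "") (PySem.List.pyGetD row c "")) (f c)) := by
  intro rows
  induction rows with
  | nil => intro f; rfl
  | cons r rs ih =>
    intro f
    simp only [List.foldl_cons]
    have hz : (cols.map f).zip cols = cols.map (fun c => (f c, c)) :=
      Eq.symm List.map_prod_right_eq_zip
    rw [hz, List.map_map]
    exact ih _

-- A's MC_tables and B's MC_tables both equal pvProcB on the filled keys of the data rows
theorem pvMCA_eq (dlbm mc dlmc : Int) (all_data : List (List String)) :
    (all_data.foldl (pvAStep mc dlbm dlmc (all_data.length : Int))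
      (true, "", 0, false, [], PySem.Dict.empty)).2.2.2.2.2
    = pvProcB dlbm dlmc none [] PySem.Dict.empty
        ((pvFillFrom mc (pvFNamed mc all_data.tail) all_data.tail).zip all_data.tail) := by
  cases all_data with
  | nil => rfl
  | cons h tl =>
    rw [List.foldl_cons]
    have hstep : pvAStep mc dlbm dlmc (((h :: tl).length : Nat) : Int)
        (true, "", 0, false, [], PySem.Dict.empty) h
        = (false, "", 0 + 1, false, [], PySem.Dict.empty) := by
      simp [pvAStep]
    rw [hstep, pvFoldA_eq mc dlbm dlmc _ tl "" (0 + 1) false [] PySem.Dict.empty (by simp)]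
    cases tl with
    | nil => rfl
    | cons r rs =>
      rw [pvL1]
      simp only [List.tail_cons]
      by_cases hv : PySem.List.pyGetD r mc "" = ""
      · rw [pvFN_empty mc r rs hv, pvFill_empty mc (pvFNamed mc rs) r rs hv,
          List.zip_cons_cons, pvProcB_none]
      · rw [pvFN_named mc r rs hv, pvFill_named mc _ r rs hv,
          List.zip_cons_cons, pvProcB_none]

theorem pvMCB_eq (dlbm mc dlmc : Int) (rows : List (List String)) :
    (let keys := (rows.foldl (fun (st : List String × String) row =>
        let v := PySem.List.pyGetD row mc ""
        let cur := if v ≠ "" then v else st.2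
        (st.1 ++ [cur], cur)) ([], "")).1
     let first := ((keys.find? (fun k => k != "")).getD "")
     let keys2 := keys.map (fun k => if k = "" then first else k)
     let s := (keys2.zip rows).foldl
      (fun (st : PySem.Dict String (List (List (String × String))) × List (List (String × String)) × Option String) kr =>
        let (MC, group, prev) := st
        let (MC, group) := match prev with
          | some p => if kr.1 ≠ p then (MC.insert p group, ([] : List (List (String × String)))) else (MC, group)
          | none => (MC, group)
        (MC, group ++ [[("DLBM", PySem.List.pyGetD kr.2 dlbm ""), ("DLMC", PySem.List.pyGetD kr.2 dlmc "")]], some kr.1))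
      (PySem.Dict.empty, [], none)
     match s.2.2 with
     | some p => s.1.insert p s.2.1
     | none => s.1)
    = pvProcB dlbm dlmc none [] PySem.Dict.empty
        ((pvFillFrom mc (pvFNamed mc rows) rows).zip rows) := by
  simp only [pvFill_fold, List.nil_append, pvFind_fill, pvMapFix]
  exact pvFoldB_eq dlbm dlmc _ _ _ _

-- A's inner rel_tables loop over all_data equals the plain fold over the data rows
theorem pvInner_eq (dlbm c : Int) (all_data : List (List String)) :
    (all_data.foldl (fun (st : Bool × PySem.Dict String String) row_value =>
        if st.1 then (false, st.2)
        else (false, st.2.insert (PySem.List.pyGetD row_value dlbm "") (PySem.List.pyGetD row_value c "")))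
      (true, PySem.Dict.empty)).2
    = all_data.tail.foldl (fun dct row_value =>
        dct.insert (PySem.List.pyGetD row_value dlbm "") (PySem.List.pyGetD row_value c "")) PySem.Dict.empty := by
  cases all_data with
  | nil => rfl
  | cons h tl => exact congrArg Prod.snd (pvSkip_fold dlbm c tl PySem.Dict.empty)

-- ===== VERDICT (by name: the statement is the Claim_ definition above) =====
theorem generate_config_rel_spec : Claim_equal_generate_config_rel := by
  intro DLBM_INDEX MC_index DLMC_index all_data _ _
  unfold Spec_generate_config_rel
  simp only [generate_config_rel, generate_config_rel_alt, PySem.List.slice_from_one]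
  refine Prod.ext ?_ ?_
  · -- rel_tables
    rw [PySem.List.foldl_append_singleton_eq_map, pvZip_fold, List.map_map]
    simp only [List.nil_append]
    refine congrArg (fun f => List.map f (PySem.List.pyRange (DLBM_INDEX + 1)
      ((PySem.List.pyGetD all_data 0 []).length : Int) 1)) (funext fun c => ?_)
    exact congrArg PySem.Dict.items (pvInner_eq DLBM_INDEX c all_data)
  · -- MC_tables
    exact congrArg PySem.Dict.items
      ((pvMCA_eq DLBM_INDEX MC_index DLMC_index all_data).trans
        (pvMCB_eq DLBM_INDEX MC_index DLMC_index all_data.tail).symm)
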